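-- pv_equiv track=rewrite | github.com/oldnordic/kwecli | agents/design/ui_designer_base.py | _analyze_design_needs
-- ===== SOURCE A (Python) =====
-- from typing import Dict, List, Any
--
-- def _analyze_design_needs(task: str) -> List[str]:
--     """Analyze task to determine required design methods."""
--     task_lower = task.lower()
--     methods = []
--
--     if any(keyword in task_lower for keyword in ["component", "system", "token"]):
--         methods.append("design_system")
--     if any(keyword in task_lower for keyword in ["interface", "screen", "page"]):
--         methods.append("interface_design")
--     if any(keyword in task_lower for keyword in ["color", "palette", "scheme"]):
--         methods.append("color_system")
--     if any(keyword in task_lower for keyword in ["typography", "font", "text"]):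
--         methods.append("typography")
--
--     return methods if methods else ["comprehensive_ui_design"]
-- ===== SOURCE B (Python) =====
-- from typing import Dict, List, Any
--
-- # keyword -> design-method label, one flat map
-- _KEYWORD_LABEL = {
--     "component": "design_system", "system": "design_system", "token": "design_system",
--     "interface": "interface_design", "screen": "interface_design", "page": "interface_design",
--     "color": "color_system", "palette": "color_system", "scheme": "color_system",
--     "typography": "typography", "font": "typography", "text": "typography",
-- }
-- _ORDER = ["design_system", "interface_design", "color_system", "typography"]
--
-- def _analyze_design_needs(task: str) -> List[str]:
--     """Single left-to-right scan over the task: at each position try every keyword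
--     with startswith, collecting the labels hit; emit them in canonical order."""
--     t = task.lower()
--     found = set()
--     for i in range(len(t)):
--         for kw, label in _KEYWORD_LABEL.items():
--             if label not in found and t.startswith(kw, i):
--                 found.add(label)
--     methods = [label for label in _ORDER if label in found]
--     return methods if methods else ["comprehensive_ui_design"]
-- ===== Notes on version B (the rewrite author's own statement) =====
-- stated objective: alternative
-- what changed: Replaces four separate any(keyword in task) substring tests with one left-to-right scan over the string's positions that matches all twelve keywords via startswith at each offset into a set of labels, then emits labels in canonical order.
import Mathlib
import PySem

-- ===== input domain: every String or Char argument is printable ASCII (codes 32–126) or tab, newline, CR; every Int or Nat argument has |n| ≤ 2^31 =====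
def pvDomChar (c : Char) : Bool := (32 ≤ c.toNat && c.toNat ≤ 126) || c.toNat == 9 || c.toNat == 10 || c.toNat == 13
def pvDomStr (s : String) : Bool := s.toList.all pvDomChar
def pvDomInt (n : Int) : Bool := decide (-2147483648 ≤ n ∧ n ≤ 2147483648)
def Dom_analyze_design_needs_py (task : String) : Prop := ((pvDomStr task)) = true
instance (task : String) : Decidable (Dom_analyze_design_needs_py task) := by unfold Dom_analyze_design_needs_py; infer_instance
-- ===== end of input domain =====

-- B replaces the four grouped any(substring) checks with one left-to-right scan over string positions matching all keywords via startswith into a set of labels, emitted in canonical order; objective: alternative.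


-- ===== PORT A =====
def analyze_design_needs_py (task : String) : List String :=
  let task_lower := PySem.Str.lower task
  let methods : List String := []
  let methods := if ["component", "system", "token"].any (fun k => PySem.Str.isIn k task_lower)
                 then methods ++ ["design_system"] else methods
  let methods := if ["interface", "screen", "page"].any (fun k => PySem.Str.isIn k task_lower)
                 then methods ++ ["interface_design"] else methods
  let methods := if ["color", "palette", "scheme"].any (fun k => PySem.Str.isIn k task_lower)
                 then methods ++ ["color_system"] else methods
  let methods := if ["typography", "font", "text"].any (fun k => PySem.Str.isIn k task_lower)
                 then methods ++ ["typography"] else methods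
  if methods ≠ [] then methods else ["comprehensive_ui_design"]

-- ===== PORT B =====
-- the flat keyword→label dict of Source B, as its items() list (insertion order)
def pvKeywordLabel : List (String × String) :=
  [("component", "design_system"), ("system", "design_system"), ("token", "design_system"),
   ("interface", "interface_design"), ("screen", "interface_design"), ("page", "interface_design"),
   ("color", "color_system"), ("palette", "color_system"), ("scheme", "color_system"),
   ("typography", "typography"), ("font", "typography"), ("text", "typography")]

def pvOrder : List String := ["design_system", "interface_design", "color_system", "typography"]

-- Source B's double loop: for i in range(len(t)): for kw,label in items: if label not in found and t.startswith(kw,i): found.add(label).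
-- Python's t.startswith(kw, i) with 0 ≤ i is exactly PySem.Chars.startswith (t.drop i) kw.toList.
def pvScan (t : List Char) : PySem.Set String :=
  (List.range t.length).foldl (fun found i =>
    pvKeywordLabel.foldl (fun found p =>
      if ¬ PySem.Set.contains found p.2 ∧ PySem.Chars.startswith (t.drop i) p.1.toList
      then PySem.Set.add found p.2 else found) found)
    PySem.Set.empty

def analyze_design_needs_py_alt (task : String) : List String :=
  let t := (PySem.Str.lower task).toList
  let found := pvScan t
  let methods := pvOrder.filter (fun label => PySem.Set.contains found label)
  if methods ≠ [] then methods else ["comprehensive_ui_design"]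

-- ===== PRECONDITION & SPEC =====
def Spec_analyze_design_needs_py (task : String) (out : List String) : Prop := out = analyze_design_needs_py_alt task
instance (task : String) (out : List String) : Decidable (Spec_analyze_design_needs_py task out) := by unfold Spec_analyze_design_needs_py; infer_instance

-- ===== CLAIM (what is proved, stated in full; the proofs are below) =====
def Claim_equal_analyze_design_needs_py : Prop := ∀ (task : String), Dom_analyze_design_needs_py task → Spec_analyze_design_needs_py task (analyze_design_needs_py task)

-- ===== LEMMAS AND PROOFS =====

-- membership after the inner fold over the keyword table
theorem pv_contains_add {s : PySem.Set String} {x y : String} :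
    PySem.Set.contains (PySem.Set.add s x) y = true ↔ (PySem.Set.contains s y = true ∨ y = x) := by
  simp [PySem.Set.contains, PySem.Set.mem_add]

-- membership after the inner fold over the keyword table
theorem pv_mem_inner (t : List Char) (i : Nat) (L : List (String × String)) (s : PySem.Set String) (lab : String) :
    PySem.Set.contains
      (L.foldl (fun found p =>
        if ¬ PySem.Set.contains found p.2 ∧ PySem.Chars.startswith (t.drop i) p.1.toList
        then PySem.Set.add found p.2 else found) s) lab = true ↔
    (PySem.Set.contains s lab = true ∨
      ∃ p ∈ L, p.2 = lab ∧ PySem.Chars.startswith (t.drop i) p.1.toList = true) := by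
  induction L generalizing s with
  | nil => simp
  | cons p L ih =>
    simp only [List.foldl_cons]
    rw [ih]
    split_ifs with hg
    · rw [pv_contains_add]
      constructor
      · rintro ((h | h) | h)
        · exact Or.inl h
        · exact Or.inr ⟨p, List.mem_cons_self, h ▸ rfl, hg.2⟩
        · exact Or.inr (by rcases h with ⟨q, hq, h1, h2⟩; exact ⟨q, List.mem_cons_of_mem _ hq, h1, h2⟩)
      · rintro (h | ⟨q, hq, h1, h2⟩)
        · exact Or.inl (Or.inl h)
        · rcases List.mem_cons.mp hq with rfl | hq
          · exact Or.inl (Or.inr h1.symm)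
          · exact Or.inr ⟨q, hq, h1, h2⟩
    · constructor
      · rintro (h | h)
        · exact Or.inl h
        · exact Or.inr (by rcases h with ⟨q, hq, h1, h2⟩; exact ⟨q, List.mem_cons_of_mem _ hq, h1, h2⟩)
      · rintro (h | ⟨q, hq, h1, h2⟩)
        · exact Or.inl h
        · rcases List.mem_cons.mp hq with rfl | hq
          · -- guard failed: either the label is already in s, or startswith is false
            rcases not_and_or.mp hg with h | h
            · rw [not_not] at h; exact Or.inl (h1 ▸ h)
            · exact absurd h2 h
          · exact Or.inr ⟨q, hq, h1, h2⟩

-- membership after the outer fold over positions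
theorem pv_mem_scan (t : List Char) (n : Nat) (lab : String) :
    PySem.Set.contains
      ((List.range n).foldl (fun found i =>
        pvKeywordLabel.foldl (fun found p =>
          if ¬ PySem.Set.contains found p.2 ∧ PySem.Chars.startswith (t.drop i) p.1.toList
          then PySem.Set.add found p.2 else found) found) PySem.Set.empty) lab = true ↔
    (∃ p ∈ pvKeywordLabel, p.2 = lab ∧ ∃ i < n, PySem.Chars.startswith (t.drop i) p.1.toList = true) := by
  induction n with
  | zero => simp [PySem.Set.empty, PySem.Set.contains]
  | succ n ih =>
    rw [List.range_succ, List.foldl_append, List.foldl_cons, List.foldl_nil, pv_mem_inner, ih]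
    constructor
    · rintro (⟨q, hq, h1, i, hi, h2⟩ | ⟨q, hq, h1, h2⟩)
      · exact ⟨q, hq, h1, i, Nat.lt_succ_of_lt hi, h2⟩
      · exact ⟨q, hq, h1, n, Nat.lt_succ_self n, h2⟩
    · rintro ⟨q, hq, h1, i, hi, h2⟩
      rcases Nat.lt_succ_iff_lt_or_eq.mp hi with hi | rfl
      · exact Or.inl ⟨q, hq, h1, i, hi, h2⟩
      · exact Or.inr ⟨q, hq, h1, h2⟩

-- a nonempty keyword starts at some position < length iff it is a substring
theorem pv_exists_pos_iff (t sub : List Char) (h : sub ≠ []) :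
    (∃ i < t.length, PySem.Chars.startswith (t.drop i) sub = true) ↔ PySem.Chars.isIn sub t = true := by
  rw [← PySem.Chars.exists_prefix_drop_iff_isIn]
  constructor
  · rintro ⟨i, _, hsw⟩
    exact ⟨i, (PySem.Chars.startswith_iff _ _).mp hsw⟩
  · rintro ⟨j, hpre⟩
    by_cases hj : j < t.length
    · exact ⟨j, hj, (PySem.Chars.startswith_iff _ _).mpr hpre⟩
    · rw [List.drop_eq_nil_of_le (Nat.le_of_not_lt hj)] at hpre
      exact absurd (List.prefix_nil.mp hpre) h

-- the scanned set holds a label iff one of its keywords is a substring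
theorem pv_scan_label (t : List Char) (lab : String) :
    PySem.Set.contains (pvScan t) lab = true ↔
    ∃ p ∈ pvKeywordLabel, p.2 = lab ∧ PySem.Chars.isIn p.1.toList t = true := by
  unfold pvScan
  rw [pv_mem_scan]
  refine ⟨fun ⟨q, hq, h1, h2⟩ => ⟨q, hq, h1, ?_⟩, fun ⟨q, hq, h1, h2⟩ => ⟨q, hq, h1, ?_⟩⟩
  · have hne : q.1.toList ≠ [] := by fin_cases hq <;> simp
    exact (pv_exists_pos_iff t _ hne).mp h2
  · have hne : q.1.toList ≠ [] := by fin_cases hq <;> simp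
    exact (pv_exists_pos_iff t _ hne).mpr h2

theorem pv_found_ds (t : List Char) :
    PySem.Set.contains (pvScan t) "design_system"
      = (PySem.Chars.isIn "component".toList t || (PySem.Chars.isIn "system".toList t || PySem.Chars.isIn "token".toList t)) := by
  rw [Bool.eq_iff_iff, pv_scan_label]
  simp [pvKeywordLabel]

theorem pv_found_id (t : List Char) :
    PySem.Set.contains (pvScan t) "interface_design"
      = (PySem.Chars.isIn "interface".toList t || (PySem.Chars.isIn "screen".toList t || PySem.Chars.isIn "page".toList t)) := by
  rw [Bool.eq_iff_iff, pv_scan_label]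
  simp [pvKeywordLabel]

theorem pv_found_cs (t : List Char) :
    PySem.Set.contains (pvScan t) "color_system"
      = (PySem.Chars.isIn "color".toList t || (PySem.Chars.isIn "palette".toList t || PySem.Chars.isIn "scheme".toList t)) := by
  rw [Bool.eq_iff_iff, pv_scan_label]
  simp [pvKeywordLabel]

theorem pv_found_ty (t : List Char) :
    PySem.Set.contains (pvScan t) "typography"
      = (PySem.Chars.isIn "typography".toList t || (PySem.Chars.isIn "font".toList t || PySem.Chars.isIn "text".toList t)) := by
  rw [Bool.eq_iff_iff, pv_scan_label]
  simp [pvKeywordLabel]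

-- ===== VERDICT (by name: the statement is the Claim_ definition above) =====
theorem analyze_design_needs_py_spec : Claim_equal_analyze_design_needs_py := by
  intro task _
  unfold Spec_analyze_design_needs_py analyze_design_needs_py analyze_design_needs_py_alt
  simp only [pvOrder, List.filter, pv_found_ds, pv_found_id, pv_found_cs, pv_found_ty,
    List.any_cons, List.any_nil, Bool.or_false, PySem.Str.isIn_eq]
  generalize (PySem.Chars.isIn "component".toList (PySem.Str.lower task).toList ||
    (PySem.Chars.isIn "system".toList (PySem.Str.lower task).toList ||
     PySem.Chars.isIn "token".toList (PySem.Str.lower task).toList)) = c1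
  generalize (PySem.Chars.isIn "interface".toList (PySem.Str.lower task).toList ||
    (PySem.Chars.isIn "screen".toList (PySem.Str.lower task).toList ||
     PySem.Chars.isIn "page".toList (PySem.Str.lower task).toList)) = c2
  generalize (PySem.Chars.isIn "color".toList (PySem.Str.lower task).toList ||
    (PySem.Chars.isIn "palette".toList (PySem.Str.lower task).toList ||
     PySem.Chars.isIn "scheme".toList (PySem.Str.lower task).toList)) = c3
  generalize (PySem.Chars.isIn "typography".toList (PySem.Str.lower task).toList ||
    (PySem.Chars.isIn "font".toList (PySem.Str.lower task).toList ||
     PySem.Chars.isIn "text".toList (PySem.Str.lower task).toList)) = c4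
  cases c1 <;> cases c2 <;> cases c3 <;> cases c4 <;> rfl
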